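-- pv_equiv track=rewrite | github.com/fasterthanlime/whisper | beeml/training/corrupt.py | find_single_word_confusions
-- ===== SOURCE A (Python) =====
-- def phoneme_edit_distance(a: list[str], b: list[str]) -> int:
--     """Levenshtein distance on phoneme sequences."""
--     m, n = len(a), len(b)
--     dp = [[0] * (n + 1) for _ in range(m + 1)]
--     for i in range(m + 1):
--         dp[i][0] = i
--     for j in range(n + 1):
--         dp[0][j] = j
--     for i in range(1, m + 1):
--         for j in range(1, n + 1):
--             cost = 0 if a[i-1] == b[j-1] else 1
--             dp[i][j] = min(dp[i-1][j] + 1, dp[i][j-1] + 1, dp[i-1][j-1] + cost)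
--     return dp[m][n]
--
-- def find_single_word_confusions(
--     target_phonemes: list[str],
--     cmudict: dict[str, list[str]],
--     max_distance: int = 3,
--     max_results: int = 10,
-- ) -> list[tuple[str, int]]:
--     """Find single words whose phonemes are close to target."""
--     candidates = []
--     target_len = len(target_phonemes)
--
--     for word, phonemes in cmudict.items():
--         # Quick filter: skip if length difference is too large
--         if abs(len(phonemes) - target_len) > max_distance:
--             continue
--         dist = phoneme_edit_distance(target_phonemes, phonemes)
--         if dist <= max_distance and dist > 0:  # exclude exact matches
--             candidates.append((word.lower(), dist))
--
--     candidates.sort(key=lambda x: (x[1], x[0]))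
--     return candidates[:max_results]
-- ===== SOURCE B (Python) =====
-- def find_single_word_confusions(
--     target_phonemes,
--     cmudict,
--     max_distance=3,
--     max_results=10,
-- ):
--     """Find single words whose phonemes are close to target.
--
--     Rolling single-row Levenshtein with a row-minimum early exit: the
--     minimum of a DP row never decreases, so once it exceeds max_distance
--     the word can be abandoned.
--     """
--     target_len = len(target_phonemes)
--     out = []
--     for word, phonemes in cmudict.items():
--         if abs(len(phonemes) - target_len) > max_distance:
--             continue
--         prev = list(range(len(phonemes) + 1))
--         ok = True
--         for p in target_phonemes:
--             cur0 = prev[0] + 1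
--             cur = [cur0]
--             diag = prev[0]
--             left = cur0
--             for q, pv in zip(phonemes, prev[1:]):
--                 v = min(pv + 1, left + 1, diag + (0 if p == q else 1))
--                 cur.append(v)
--                 diag = pv
--                 left = v
--             if min(cur) > max_distance:
--                 ok = False
--                 break
--             prev = cur
--         if ok:
--             d = prev[-1]
--             if 0 < d <= max_distance:
--                 out.append((word.lower(), d))
--     out.sort(key=lambda x: (x[1], x[0]))
--     return out[:max_results]
-- ===== Notes on version B (the rewrite author's own statement) =====
-- stated objective: alternative
-- what changed: Replaces the full (m+1)x(n+1) DP matrix per word with a rolling single-row Levenshtein that abandons a word early once the row minimum (which never decreases) exceeds max_distance.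
import Mathlib
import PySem

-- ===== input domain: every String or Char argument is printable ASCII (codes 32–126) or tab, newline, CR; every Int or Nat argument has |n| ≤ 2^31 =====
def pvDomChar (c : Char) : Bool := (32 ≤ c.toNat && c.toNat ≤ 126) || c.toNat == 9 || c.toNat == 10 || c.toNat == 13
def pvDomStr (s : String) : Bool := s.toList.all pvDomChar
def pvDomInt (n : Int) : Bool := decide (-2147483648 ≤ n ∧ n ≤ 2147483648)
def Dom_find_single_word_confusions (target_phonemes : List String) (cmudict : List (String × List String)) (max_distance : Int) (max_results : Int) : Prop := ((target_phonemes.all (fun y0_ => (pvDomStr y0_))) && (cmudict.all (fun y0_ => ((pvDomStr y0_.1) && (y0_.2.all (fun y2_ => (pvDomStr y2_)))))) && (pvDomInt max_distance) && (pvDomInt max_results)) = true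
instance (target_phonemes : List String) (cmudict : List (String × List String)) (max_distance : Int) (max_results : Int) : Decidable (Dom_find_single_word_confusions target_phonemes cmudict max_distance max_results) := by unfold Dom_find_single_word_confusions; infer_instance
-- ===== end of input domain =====

-- B replaces A's full DP matrix per word by a rolling single-row Levenshtein with a
-- row-minimum early exit; proved to return exactly A's value on every input.


-- ===== PORT A =====
-- literal transliteration of A's phoneme_edit_distance: full (m+1)×(n+1) matrix,
-- init loops, then the nested i/j loops (range(1,m+1) written as i0+1 over range m)
def phoneme_edit_distance (a b : List String) : Int :=
  let m := a.length
  let n := b.length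
  let dp0 : List (List Int) := (List.range (m+1)).map (fun _ => List.replicate (n+1) (0:Int))
  let dp1 := (List.range (m+1)).foldl (fun dp i => dp.set i ((dp.getD i []).set 0 (Int.ofNat i))) dp0
  let dp2 := (List.range (n+1)).foldl (fun dp j => dp.set 0 ((dp.getD 0 []).set j (Int.ofNat j))) dp1
  let dp3 := (List.range m).foldl (fun dp i0 =>
      (List.range n).foldl (fun dp j0 =>
        let cost : Int := if a.getD i0 "" = b.getD j0 "" then 0 else 1
        let v := min ((dp.getD i0 []).getD (j0+1) 0 + 1)
                 (min ((dp.getD (i0+1) []).getD j0 0 + 1)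
                      ((dp.getD i0 []).getD j0 0 + cost))
        dp.set (i0+1) ((dp.getD (i0+1) []).set (j0+1) v)) dp) dp2
  (dp3.getD m []).getD n 0

def find_single_word_confusions (target_phonemes : List String) (cmudict : List (String × List String)) (max_distance : Int) (max_results : Int) : List (String × Int) :=
  let target_len : Int := target_phonemes.length
  let candidates := (PySem.Dict.ofList cmudict).items.foldl (fun acc wp =>
      if |((wp.2.length : Int)) - target_len| > max_distance then acc
      else
        let dist := phoneme_edit_distance target_phonemes wp.2
        if dist ≤ max_distance ∧ dist > 0 then acc ++ [(PySem.Str.lower wp.1, dist)] else acc) []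
  PySem.List.slice (PySem.List.sorted2 candidates (fun x => x.2) (fun x => x.1)) none (some max_results)

-- ===== PORT B =====
-- Source B's inner loop: walks phonemes and prev[1:] together carrying diag/left
def nrowGo (p : String) (ph : List String) (prevTail : List Int) (diag left : Int) : List Int :=
  match ph, prevTail with
  | q :: ph', pv :: rest =>
      let v := min (pv + 1) (min (left + 1) (diag + (if p = q then (0:Int) else 1)))
      v :: nrowGo p ph' rest pv v
  | _, _ => []

-- one row step: cur = [prev[0]+1] followed by the zip loop
def nrow (p : String) (ph : List String) (prev : List Int) : List Int :=
  match prev with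
  | pv0 :: rest => (pv0 + 1) :: nrowGo p ph rest pv0 (pv0 + 1)
  | [] => []

-- min(cur); cur is always nonempty where Source B calls it (Python's min would raise on [])
def listMin : List Int → Int
  | [] => 0
  | c :: r => r.foldl min c

-- prev[-1]; prev is always nonempty where Source B reads it
def lastVal (prev : List Int) : Int := (PySem.List.pyGet? prev (-1)).getD 0

-- Source B's per-word row loop with the early break (none = broke out)
def bWordLoop (t ph : List String) (k : Int) : Option (List Int) :=
  t.foldl (fun st p =>
      match st with
      | none => none
      | some prev =>
          let cur := nrow p ph prev
          if listMin cur > k then none else some cur)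
    (some (PySem.List.pyRange 0 ((ph.length : Int) + 1) 1))

def find_single_word_confusions_alt (target_phonemes : List String) (cmudict : List (String × List String)) (max_distance : Int) (max_results : Int) : List (String × Int) :=
  let target_len : Int := target_phonemes.length
  let out := (PySem.Dict.ofList cmudict).items.foldl (fun acc wp =>
      if |((wp.2.length : Int)) - target_len| > max_distance then acc
      else
        match bWordLoop target_phonemes wp.2 max_distance with
        | none => acc
        | some prev =>
            let d := lastVal prev
            if 0 < d ∧ d ≤ max_distance then acc ++ [(PySem.Str.lower wp.1, d)] else acc) []
  PySem.List.slice (PySem.List.sorted2 out (fun x => x.2) (fun x => x.1)) none (some max_results)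

-- ===== PRECONDITION & SPEC =====
def Spec_find_single_word_confusions (target_phonemes : List String) (cmudict : List (String × List String)) (max_distance : Int) (max_results : Int) (out : List (String × Int)) : Prop := out = find_single_word_confusions_alt target_phonemes cmudict max_distance max_results
instance (target_phonemes : List String) (cmudict : List (String × List String)) (max_distance : Int) (max_results : Int) (out : List (String × Int)) : Decidable (Spec_find_single_word_confusions target_phonemes cmudict max_distance max_results out) := by unfold Spec_find_single_word_confusions; infer_instance

-- ===== CLAIM (what is proved, stated in full; the proofs are below) =====
def Claim_equal_find_single_word_confusions : Prop := ∀ (target_phonemes : List String) (cmudict : List (String × List String)) (max_distance : Int) (max_results : Int), Dom_find_single_word_confusions target_phonemes cmudict max_distance max_results → Spec_find_single_word_confusions target_phonemes cmudict max_distance max_results (find_single_word_confusions target_phonemes cmudict max_distance max_results)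

-- ===== LEMMAS AND PROOFS =====

-- ---------- generic list lemmas ----------

theorem getElem?_range_lt {n i : Nat} (h : i < n) : (List.range n)[i]? = some i := by
  simp [h]

theorem map_getD_range {α : Type} (d : α) (xs : List α) :
    (List.range xs.length).map (fun i => xs.getD i d) = xs := by
  apply List.ext_getElem (by simp)
  intro i h1 h2
  simp [List.getD_eq_getElem?_getD, List.getElem?_eq_getElem h2]

theorem set_getD_self {α : Type} (d : α) (xs : List α) (i : Nat) (h : i < xs.length) :
    xs.set i (xs.getD i d) = xs := by
  apply List.ext_getElem (by simp)
  intro j h1 h2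
  rw [List.getElem_set]
  split
  · subst j; simp [List.getD_eq_getElem?_getD, List.getElem?_eq_getElem h]
  · rfl

theorem getD_set_ne {α : Type} (d : α) (xs : List α) (i j : Nat) (v : α) (h : i ≠ j) :
    (xs.set i v).getD j d = xs.getD j d := by
  simp [List.getD_eq_getElem?_getD, List.getElem?_set_ne h]

theorem getD_set_self {α : Type} (d : α) (xs : List α) (i : Nat) (v : α) (h : i < xs.length) :
    (xs.set i v).getD i d = v := by
  simp [List.getD_eq_getElem?_getD, h]

-- a fold over range k that sets each index once, reading only the not-yet-written cell
theorem foldl_set_range {α : Type} (d : α) (u : Nat → α → α) :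
    ∀ (k : Nat) (xs : List α), k ≤ xs.length →
    (List.range k).foldl (fun l i => l.set i (u i (l.getD i d))) xs
      = (List.range xs.length).map (fun i => if i < k then u i (xs.getD i d) else xs.getD i d) := by
  intro k
  induction k with
  | zero =>
      intro xs _
      rw [List.range_zero]
      simp only [List.foldl_nil]
      have he : ∀ i : Nat, (if i < 0 then u i (xs.getD i d) else xs.getD i d) = xs.getD i d := by
        intro i; rw [if_neg (by omega)]
      simp only [he]
      exact (map_getD_range d xs).symm
  | succ k ih =>
      intro xs hk
      rw [List.range_succ, List.foldl_append, ih xs (by omega)]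
      have hgd : ((List.range xs.length).map
          (fun i => if i < k then u i (xs.getD i d) else xs.getD i d)).getD k d
            = xs.getD k d := by
        rw [List.getD_eq_getElem?_getD, List.getElem?_map, getElem?_range_lt (by omega)]
        simp
      simp only [List.foldl_cons, List.foldl_nil]
      apply List.ext_getElem (by simp)
      intro i h1 h2
      rw [List.getElem_set]
      split
      · rename_i hik
        subst hik
        rw [hgd]
        simp only [List.getElem_map, List.getElem_range]
        rw [if_pos (by omega)]
      · rename_i hik
        simp only [List.getElem_map, List.getElem_range]
        by_cases h3 : i < k
        · rw [if_pos h3, if_pos (by omega)]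
        · rw [if_neg h3, if_neg (by omega)]

-- a fold that repeatedly rewrites only cell 0
theorem foldl_set_zero {α β : Type} (d : α) (g : β → α → α) :
    ∀ (js : List β) (xs : List α), xs ≠ [] →
    js.foldl (fun l j => l.set 0 (g j (l.getD 0 d))) xs
      = xs.set 0 (js.foldl (fun r j => g j r) (xs.getD 0 d)) := by
  intro js
  induction js with
  | nil =>
      intro xs h
      cases xs with
      | nil => simp at h
      | cons a t =>
          simp only [List.foldl_nil]
          exact set_getD_self d (a :: t) 0 (by simp)
  | cons j js ih =>
      intro xs h
      have hlen : 0 < xs.length := by cases xs with | nil => simp at h | cons a t => simp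
      simp only [List.foldl_cons]
      rw [ih (xs.set 0 (g j (xs.getD 0 d))) (by simp [← List.length_pos_iff]; omega)]
      rw [List.set_set, getD_set_self d xs 0 _ hlen]

theorem foldl_congr' {α β : Type} (f g : β → α → β) (h : ∀ acc x, f acc x = g acc x) :
    ∀ (l : List α) (a : β), l.foldl f a = l.foldl g a := by
  intro l
  induction l with
  | nil => intro a; rfl
  | cons x t ih => intro a; simp only [List.foldl_cons, h]; exact ih _

-- ---------- rows ----------

def row0 (n : Nat) : List Int := List.map (fun i : Nat => (i : Int)) (List.range (n+1))

theorem row0_length (n : Nat) : (row0 n).length = n + 1 := by simp [row0]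

theorem row0_getD (n j : Nat) (h : j ≤ n) : (row0 n).getD j 0 = (j : Int) := by
  rw [row0, List.getD_eq_getElem?_getD, List.getElem?_map, getElem?_range_lt (by omega)]
  rfl

def Rrow (t ph : List String) : Nat → List Int
  | 0 => row0 ph.length
  | i + 1 => nrow (t.getD i "") ph (Rrow t ph i)

theorem nrowGo_length (p : String) :
    ∀ (ph : List String) (rest : List Int) (diag left : Int),
    (nrowGo p ph rest diag left).length = min ph.length rest.length := by
  intro ph
  induction ph with
  | nil => intro rest diag left; cases rest <;> simp [nrowGo]
  | cons q ph' ih =>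
      intro rest diag left
      cases rest with
      | nil => simp [nrowGo]
      | cons pv rest' => simp [nrowGo, ih]

theorem nrow_length (p : String) (ph : List String) (prev : List Int)
    (h : prev.length = ph.length + 1) :
    (nrow p ph prev).length = ph.length + 1 := by
  cases prev with
  | nil => simp at h
  | cons pv0 rest =>
      simp [nrow, nrowGo_length]
      simp at h
      omega

theorem Rrow_length (t ph : List String) (i : Nat) : (Rrow t ph i).length = ph.length + 1 := by
  induction i with
  | zero => simp [Rrow, row0_length]
  | succ i ih => rw [Rrow]; exact nrow_length _ _ _ ih

theorem Rrow_ne_nil (t ph : List String) (i : Nat) : Rrow t ph i ≠ [] := by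
  have := Rrow_length t ph i
  intro h; rw [h] at this; simp at this

theorem nrow_getD_zero (p : String) (ph : List String) (prev : List Int) (h : prev ≠ []) :
    (nrow p ph prev).getD 0 0 = prev.getD 0 0 + 1 := by
  cases prev with
  | nil => simp at h
  | cons pv0 rest => simp [nrow]

theorem Rrow_head (t ph : List String) (i : Nat) : (Rrow t ph i).getD 0 0 = (i : Int) := by
  induction i with
  | zero => rw [Rrow]; exact row0_getD ph.length 0 (by omega)
  | succ i ih =>
      rw [Rrow, nrow_getD_zero _ _ _ (Rrow_ne_nil t ph i), ih]
      push_cast; ring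

-- recurrence for the tail of nrowGo
theorem nrowGo_getD_succ_rec (p : String) :
    ∀ (j : Nat) (ph : List String) (rest : List Int) (diag left : Int),
    rest.length = ph.length → j + 1 < ph.length →
    (nrowGo p ph rest diag left).getD (j+1) 0
      = min (rest.getD (j+1) 0 + 1)
          (min ((nrowGo p ph rest diag left).getD j 0 + 1)
               (rest.getD j 0 + (if p = ph.getD (j+1) "" then 0 else 1))) := by
  intro j
  induction j with
  | zero =>
      intro ph rest diag left hlen hj
      match ph, rest with
      | q :: q2 :: ph'', pv :: pv2 :: rest'' => simp [nrowGo]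
      | q :: [], rest => simp at hj
      | [], rest => simp at hj
      | q :: q2 :: ph'', [] => simp at hlen
      | q :: q2 :: ph'', [pv] => simp at hlen
  | succ j ih =>
      intro ph rest diag left hlen hj
      match ph, rest with
      | q :: ph', pv :: rest' =>
          simp only [nrowGo]
          have h1 : rest'.length = ph'.length := by simp at hlen; omega
          have h2 : j + 1 < ph'.length := by simp at hj; omega
          have := ih ph' rest' pv
            (min (pv + 1) (min (left + 1) (diag + (if p = q then (0:Int) else 1)))) h1 h2
          simp only [List.getD_cons_succ]
          exact this
      | [], rest => simp at hj
      | q :: ph', [] => simp at hlen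

theorem nrow_getD_succ (p : String) (ph : List String) (prev : List Int) (j : Nat)
    (hlen : prev.length = ph.length + 1) (hj : j < ph.length) :
    (nrow p ph prev).getD (j+1) 0
      = min (prev.getD (j+1) 0 + 1)
          (min ((nrow p ph prev).getD j 0 + 1)
               (prev.getD j 0 + (if p = ph.getD j "" then 0 else 1))) := by
  match prev with
  | pv0 :: rest =>
      have hr : rest.length = ph.length := by simp at hlen; omega
      cases j with
      | zero =>
          match ph, rest with
          | q :: ph', pv :: rest' => simp [nrow, nrowGo]
          | [], rest => simp at hj
          | q :: ph', [] => simp at hr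
      | succ j =>
          simp only [nrow, List.getD_cons_succ]
          exact nrowGo_getD_succ_rec p j ph rest pv0 (pv0 + 1) hr hj
  | [] => simp at hlen

theorem Rrow_getD_succ (t ph : List String) (i j : Nat) (hj : j < ph.length) :
    (Rrow t ph (i+1)).getD (j+1) 0
      = min ((Rrow t ph i).getD (j+1) 0 + 1)
          (min ((Rrow t ph (i+1)).getD j 0 + 1)
               ((Rrow t ph i).getD j 0 + (if t.getD i "" = ph.getD j "" then 0 else 1))) := by
  conv_lhs => rw [Rrow]
  rw [nrow_getD_succ _ _ _ _ (Rrow_length t ph i) hj]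
  rw [← Rrow]

-- ---------- the matrix states of port A ----------

def dpSt (t ph : List String) (m n i : Nat) : List (List Int) :=
  List.map (fun r : Nat => if r ≤ i then Rrow t ph r else (r : Int) :: List.replicate n 0)
    (List.range (m+1))

def partRow (t ph : List String) (n i0 j : Nat) : List Int :=
  List.map (fun c : Nat => if c ≤ j then (Rrow t ph (i0+1)).getD c 0 else 0) (List.range (n+1))

theorem dpSt_length (t ph : List String) (m n i : Nat) : (dpSt t ph m n i).length = m + 1 := by
  simp [dpSt]

theorem partRow_length (t ph : List String) (n i0 j : Nat) :
    (partRow t ph n i0 j).length = n + 1 := by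
  simp [partRow]

theorem dpSt_getD (t ph : List String) (m n i r : Nat) (hr : r ≤ m) :
    (dpSt t ph m n i).getD r []
      = (if r ≤ i then Rrow t ph r else (r : Int) :: List.replicate n 0) := by
  rw [dpSt, List.getD_eq_getElem?_getD, List.getElem?_map, getElem?_range_lt (by omega)]
  rfl

theorem partRow_getD (t ph : List String) (n i0 j c : Nat) (hc : c ≤ n) :
    (partRow t ph n i0 j).getD c 0
      = (if c ≤ j then (Rrow t ph (i0+1)).getD c 0 else 0) := by
  rw [partRow, List.getD_eq_getElem?_getD, List.getElem?_map, getElem?_range_lt (by omega)]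
  rfl

theorem getElem_eq_getD {α : Type} (d : α) (xs : List α) (i : Nat) (h : i < xs.length) :
    xs[i]'h = xs.getD i d := by
  rw [List.getD_eq_getElem?_getD, List.getElem?_eq_getElem h]
  rfl

theorem partRow_zero (t ph : List String) (n i0 : Nat) :
    partRow t ph n i0 0 = ((i0 : Int) + 1) :: List.replicate n 0 := by
  apply List.ext_getElem (by simp [partRow_length])
  intro c h1 h2
  rw [getElem_eq_getD 0 _ c h1, partRow_getD t ph n i0 0 c (by rw [partRow_length] at h1; omega)]
  cases c with
  | zero =>
      have := Rrow_head t ph (i0+1)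
      simp only [Nat.le_refl, if_pos, this]
      push_cast; simp
  | succ c =>
      rw [if_neg (by omega)]
      have hc : c < n := by rw [partRow_length] at h1; omega
      simp [List.getElem_replicate]

theorem partRow_full (t ph : List String) (n i0 : Nat) (hn : n = ph.length) :
    partRow t ph n i0 n = Rrow t ph (i0+1) := by
  apply List.ext_getElem (by simp [partRow_length, Rrow_length, hn])
  intro c h1 h2
  have hc : c ≤ n := by rw [partRow_length] at h1; omega
  rw [getElem_eq_getD 0 _ c h1, partRow_getD t ph n i0 n c hc, if_pos hc,
    getElem_eq_getD 0 _ c h2]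

theorem partRow_set (t ph : List String) (n i0 j : Nat) (_hj : j < n) :
    (partRow t ph n i0 j).set (j+1) ((Rrow t ph (i0+1)).getD (j+1) 0)
      = partRow t ph n i0 (j+1) := by
  apply List.ext_getElem (by simp [partRow_length])
  intro c h1 h2
  have hc : c ≤ n := by rw [partRow_length] at h2; omega
  rw [List.getElem_set]
  rw [getElem_eq_getD 0 _ c h2, partRow_getD t ph n i0 (j+1) c hc]
  split
  · rename_i hcj
    subst hcj
    rw [if_pos (by omega)]
  · rename_i hcj
    rw [getElem_eq_getD 0 _ c (by rw [partRow_length]; omega),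
      partRow_getD t ph n i0 j c hc]
    by_cases h3 : c ≤ j
    · rw [if_pos h3, if_pos (by omega)]
    · rw [if_neg h3, if_neg (by omega)]

theorem dpSt_set_succ (t ph : List String) (m n i0 : Nat) (_hi : i0 < m) :
    (dpSt t ph m n i0).set (i0+1) (Rrow t ph (i0+1)) = dpSt t ph m n (i0+1) := by
  apply List.ext_getElem (by simp [dpSt_length])
  intro r h1 h2
  have hr : r ≤ m := by rw [dpSt_length] at h2; omega
  rw [List.getElem_set]
  rw [getElem_eq_getD [] _ r h2, dpSt_getD t ph m n (i0+1) r hr]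
  split
  · rename_i hri
    subst hri
    rw [if_pos (by omega)]
  · rename_i hri
    rw [getElem_eq_getD [] _ r (by rw [dpSt_length]; omega),
      dpSt_getD t ph m n i0 r hr]
    by_cases h3 : r ≤ i0
    · rw [if_pos h3, if_pos (by omega)]
    · rw [if_neg h3, if_neg (by omega)]

-- ---------- port A evaluates to Rrow ----------

theorem dp_init1 (t ph : List String) :
    (List.range (t.length+1)).foldl (fun dp i => dp.set i ((dp.getD i []).set 0 (Int.ofNat i)))
        ((List.range (t.length+1)).map (fun _ => List.replicate (ph.length+1) (0:Int)))
      = List.map (fun r : Nat => (r : Int) :: List.replicate ph.length 0)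
          (List.range (t.length+1)) := by
  have h : (List.range (t.length+1)).foldl
        (fun dp i => dp.set i ((dp.getD i []).set 0 (Int.ofNat i)))
        ((List.range (t.length+1)).map (fun _ => List.replicate (ph.length+1) (0:Int)))
      = (List.range ((List.map (fun _ => List.replicate (ph.length+1) (0:Int))
            (List.range (t.length+1))).length)).map
          (fun i => if i < t.length+1
            then ((List.map (fun _ => List.replicate (ph.length+1) (0:Int))
                (List.range (t.length+1))).getD i []).set 0 (Int.ofNat i)
            else (List.map (fun _ => List.replicate (ph.length+1) (0:Int))
                (List.range (t.length+1))).getD i []) :=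
    foldl_set_range ([] : List Int) (fun i x => x.set 0 (Int.ofNat i)) (t.length+1) _ (by simp)
  rw [h]
  simp only [List.length_map, List.length_range]
  apply List.map_congr_left
  intro i hi
  rw [List.mem_range] at hi
  rw [if_pos hi]
  rw [List.getD_eq_getElem?_getD, List.getElem?_map, getElem?_range_lt hi]
  simp only [Option.map_some, Option.getD_some, List.replicate_succ, List.set_cons_zero]
  simp

theorem dp_init2 (t ph : List String) :
    (List.range (ph.length+1)).foldl (fun dp j => dp.set 0 ((dp.getD 0 []).set j (Int.ofNat j)))
        (List.map (fun r : Nat => (r : Int) :: List.replicate ph.length 0)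
          (List.range (t.length+1)))
      = dpSt t ph t.length ph.length 0 := by
  have h : (List.range (ph.length+1)).foldl
        (fun dp j => dp.set 0 ((dp.getD 0 []).set j (Int.ofNat j)))
        (List.map (fun r : Nat => (r : Int) :: List.replicate ph.length 0)
          (List.range (t.length+1)))
      = (List.map (fun r : Nat => (r : Int) :: List.replicate ph.length 0)
          (List.range (t.length+1))).set 0
          ((List.range (ph.length+1)).foldl (fun row j => row.set j (Int.ofNat j))
            ((List.map (fun r : Nat => (r : Int) :: List.replicate ph.length 0)
              (List.range (t.length+1))).getD 0 [])) :=
    foldl_set_zero ([] : List Int) (fun (j : Nat) (row : List Int) => row.set j (Int.ofNat j))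
      (List.range (ph.length+1)) _ (by simp)
  rw [h]
  have hx0 : (List.map (fun r : Nat => (r : Int) :: List.replicate ph.length 0)
      (List.range (t.length+1))).getD 0 [] = (0 : Int) :: List.replicate ph.length 0 := by
    rw [List.getD_eq_getElem?_getD, List.getElem?_map, getElem?_range_lt (by omega)]
    simp
  rw [hx0]
  have hrow : (List.range (ph.length+1)).foldl (fun row j => row.set j (Int.ofNat j))
      ((0 : Int) :: List.replicate ph.length 0) = row0 ph.length := by
    have h2 : (List.range (ph.length+1)).foldl (fun row j => row.set j (Int.ofNat j))
        ((0 : Int) :: List.replicate ph.length 0)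
        = (List.range (((0 : Int) :: List.replicate ph.length 0).length)).map
            (fun j => if j < ph.length+1
              then Int.ofNat j
              else ((0 : Int) :: List.replicate ph.length 0).getD j 0) :=
      foldl_set_range (0 : Int) (fun j _ => Int.ofNat j) (ph.length+1) _ (by simp)
    rw [h2]
    simp only [List.length_cons, List.length_replicate]
    apply List.map_congr_left
    intro j hj
    rw [List.mem_range] at hj
    rw [if_pos hj]
    simp
  rw [hrow]
  apply List.ext_getElem (by simp [dpSt_length])
  intro r h1 h2
  rw [List.getElem_set]
  rw [getElem_eq_getD [] _ r h2, dpSt_getD t ph t.length ph.length 0 r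
    (by rw [dpSt_length] at h2; omega)]
  split
  · rename_i hr0
    subst hr0
    rw [if_pos (by omega)]
    rfl
  · rename_i hr0
    rw [if_neg (by omega)]
    rw [getElem_eq_getD [] _ r (by simp; rw [List.length_set, List.length_map] at h1; simpa using h1)]
    rw [List.getD_eq_getElem?_getD, List.getElem?_map,
      getElem?_range_lt (by rw [List.length_set, List.length_map, List.length_range] at h1; omega)]
    rfl

theorem dp_inner (t ph : List String) (i0 : Nat) (hi0 : i0 < t.length) :
    ∀ (j : Nat), j ≤ ph.length →
    (List.range j).foldl (fun dp j0 =>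
        dp.set (i0+1) ((dp.getD (i0+1) []).set (j0+1)
          (min ((dp.getD i0 []).getD (j0+1) 0 + 1)
            (min ((dp.getD (i0+1) []).getD j0 0 + 1)
              ((dp.getD i0 []).getD j0 0
                + (if t.getD i0 "" = ph.getD j0 "" then (0:Int) else 1))))))
      (dpSt t ph t.length ph.length i0)
      = (dpSt t ph t.length ph.length i0).set (i0+1) (partRow t ph ph.length i0 j) := by
  intro j
  induction j with
  | zero =>
      intro _
      rw [List.range_zero, List.foldl_nil, partRow_zero]
      have hv : ((i0 : Int) + 1) :: List.replicate ph.length 0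
          = (dpSt t ph t.length ph.length i0).getD (i0+1) [] := by
        rw [dpSt_getD t ph t.length ph.length i0 (i0+1) (by omega), if_neg (by omega)]
        push_cast
        simp
      rw [hv, set_getD_self [] _ (i0+1) (by rw [dpSt_length]; omega)]
  | succ j ih =>
      intro hj
      rw [List.range_succ, List.foldl_append, ih (by omega)]
      simp only [List.foldl_cons, List.foldl_nil]
      have hne : i0 + 1 ≠ i0 := by omega
      have hgi0 : (((dpSt t ph t.length ph.length i0).set (i0+1)
          (partRow t ph ph.length i0 j)).getD i0 []) = Rrow t ph i0 := by
        rw [getD_set_ne [] _ (i0+1) i0 _ hne,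
          dpSt_getD t ph t.length ph.length i0 i0 (by omega), if_pos (le_refl i0)]
      have hgi1 : (((dpSt t ph t.length ph.length i0).set (i0+1)
          (partRow t ph ph.length i0 j)).getD (i0+1) []) = partRow t ph ph.length i0 j := by
        rw [getD_set_self [] _ (i0+1) _ (by rw [dpSt_length]; omega)]
      rw [hgi0, hgi1]
      rw [partRow_getD t ph ph.length i0 j j (by omega), if_pos (le_refl j)]
      have hv : min ((Rrow t ph i0).getD (j+1) 0 + 1)
          (min ((Rrow t ph (i0+1)).getD j 0 + 1)
            ((Rrow t ph i0).getD j 0 + (if t.getD i0 "" = ph.getD j "" then (0:Int) else 1)))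
          = (Rrow t ph (i0+1)).getD (j+1) 0 :=
        (Rrow_getD_succ t ph i0 j (by omega)).symm
      rw [hv, List.set_set, partRow_set t ph ph.length i0 j (by omega)]

theorem dp_outer (t ph : List String) :
    ∀ (i : Nat), i ≤ t.length →
    (List.range i).foldl (fun dp i0 =>
        (List.range ph.length).foldl (fun dp j0 =>
          dp.set (i0+1) ((dp.getD (i0+1) []).set (j0+1)
            (min ((dp.getD i0 []).getD (j0+1) 0 + 1)
              (min ((dp.getD (i0+1) []).getD j0 0 + 1)
                ((dp.getD i0 []).getD j0 0
                  + (if t.getD i0 "" = ph.getD j0 "" then (0:Int) else 1)))))) dp)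
      (dpSt t ph t.length ph.length 0)
      = dpSt t ph t.length ph.length i := by
  intro i
  induction i with
  | zero => intro _; rw [List.range_zero, List.foldl_nil]
  | succ i ih =>
      intro hi
      rw [List.range_succ, List.foldl_append, ih (by omega)]
      simp only [List.foldl_cons, List.foldl_nil]
      rw [dp_inner t ph i (by omega) ph.length (le_refl _),
        partRow_full t ph ph.length i rfl,
        dpSt_set_succ t ph t.length ph.length i (by omega)]

theorem phoneme_edit_distance_eq (t ph : List String) :
    phoneme_edit_distance t ph = (Rrow t ph t.length).getD ph.length 0 := by
  have hfinal :
      ((((List.range t.length).foldl (fun dp i0 =>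
          (List.range ph.length).foldl (fun dp j0 =>
            dp.set (i0+1) ((dp.getD (i0+1) []).set (j0+1)
              (min ((dp.getD i0 []).getD (j0+1) 0 + 1)
                (min ((dp.getD (i0+1) []).getD j0 0 + 1)
                  ((dp.getD i0 []).getD j0 0
                    + (if t.getD i0 "" = ph.getD j0 "" then (0:Int) else 1)))))) dp)
          ((List.range (ph.length+1)).foldl
            (fun dp j => dp.set 0 ((dp.getD 0 []).set j (Int.ofNat j)))
            ((List.range (t.length+1)).foldl
              (fun dp i => dp.set i ((dp.getD i []).set 0 (Int.ofNat i)))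
              ((List.range (t.length+1)).map
                (fun _ => List.replicate (ph.length+1) (0:Int))))))).getD t.length []).getD
          ph.length 0
        = (Rrow t ph t.length).getD ph.length 0 := by
    rw [dp_init1, dp_init2, dp_outer t ph t.length (le_refl _),
      dpSt_getD t ph t.length ph.length t.length t.length (le_refl _), if_pos (le_refl _)]
  exact hfinal

-- ---------- B-side: min monotonicity and the early exit ----------

theorem foldl_min_le_init : ∀ (r : List Int) (c : Int), r.foldl min c ≤ c := by
  intro r
  induction r with
  | nil => intro c; simp
  | cons x r ih =>
      intro c
      simp only [List.foldl_cons]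
      exact le_trans (ih (min c x)) (min_le_left c x)

theorem foldl_min_le_mem : ∀ (r : List Int) (c x : Int), x ∈ r → r.foldl min c ≤ x := by
  intro r
  induction r with
  | nil => intro c x hx; simp at hx
  | cons y r ih =>
      intro c x hx
      simp only [List.mem_cons] at hx
      simp only [List.foldl_cons]
      rcases hx with h | h
      · subst h
        exact le_trans (foldl_min_le_init r (min c x)) (min_le_right c x)
      · exact ih (min c y) x h

theorem listMin_le_mem (c : Int) (r : List Int) : ∀ x ∈ c :: r, listMin (c :: r) ≤ x := by
  intro x hx
  simp only [List.mem_cons] at hx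
  rcases hx with h | h
  · subst h
    exact foldl_min_le_init r x
  · exact foldl_min_le_mem r c x h

theorem le_foldl_min : ∀ (r : List Int) (c a : Int), a ≤ c → (∀ x ∈ r, a ≤ x) →
    a ≤ r.foldl min c := by
  intro r
  induction r with
  | nil => intro c a h _; simpa using h
  | cons y r ih =>
      intro c a h hall
      simp only [List.foldl_cons]
      exact ih (min c y) a (le_min h (hall y (by simp))) (fun x hx => hall x (by simp [hx]))

theorem le_listMin (c : Int) (r : List Int) (a : Int) (h : ∀ x ∈ c :: r, a ≤ x) :
    a ≤ listMin (c :: r) :=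
  le_foldl_min r c a (h c (by simp)) (fun x hx => h x (by simp [hx]))

theorem mem_nrowGo_ge (p : String) (mu : Int) :
    ∀ (ph : List String) (rest : List Int) (diag left : Int),
    (∀ x ∈ rest, mu ≤ x) → mu ≤ diag → mu ≤ left →
    ∀ y ∈ nrowGo p ph rest diag left, mu ≤ y := by
  intro ph
  induction ph with
  | nil => intro rest diag left _ _ _ y hy; cases rest <;> simp [nrowGo] at hy
  | cons q ph' ih =>
      intro rest diag left hrest hdiag hleft y hy
      cases rest with
      | nil => simp [nrowGo] at hy
      | cons pv rest' =>
          simp only [nrowGo, List.mem_cons] at hy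
          have hpv : mu ≤ pv := hrest pv (by simp)
          have hv : mu ≤ min (pv + 1) (min (left + 1) (diag + (if p = q then (0:Int) else 1))) := by
            apply le_min (by omega)
            apply le_min (by omega)
            split <;> omega
          rcases hy with h | h
          · subst h; exact hv
          · exact ih rest' pv _ (fun x hx => hrest x (by simp [hx])) hpv hv y h

theorem nrow_min_mono (p : String) (ph : List String) (prev : List Int) (h : prev ≠ []) :
    listMin prev ≤ listMin (nrow p ph prev) := by
  cases prev with
  | nil => simp at h
  | cons pv0 rest =>
      simp only [nrow]
      apply le_listMin
      intro x hx
      simp only [List.mem_cons] at hx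
      have h0 : listMin (pv0 :: rest) ≤ pv0 := listMin_le_mem pv0 rest pv0 (by simp)
      rcases hx with h' | h'
      · omega
      · exact mem_nrowGo_ge p _ ph rest pv0 (pv0 + 1)
          (fun x hx => listMin_le_mem pv0 rest x (by simp [hx])) h0 (by omega) x h'

def levFrom (t ph : List String) (prev : List Int) : List Int :=
  t.foldl (fun r p => nrow p ph r) prev

theorem nrow_ne_nil (p : String) (ph : List String) (prev : List Int) (h : prev ≠ []) :
    nrow p ph prev ≠ [] := by
  cases prev with
  | nil => simp at h
  | cons a b => simp [nrow]

theorem levFrom_min_mono (ph : List String) :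
    ∀ (t : List String) (prev : List Int), prev ≠ [] → listMin prev ≤ listMin (levFrom t ph prev) := by
  intro t
  induction t with
  | nil => intro prev h; simp [levFrom]
  | cons p t' ih =>
      intro prev h
      calc listMin prev ≤ listMin (nrow p ph prev) := nrow_min_mono p ph prev h
        _ ≤ listMin (levFrom t' ph (nrow p ph prev)) := ih _ (nrow_ne_nil p ph prev h)
        _ = listMin (levFrom (p :: t') ph prev) := rfl

theorem foldl_step_none (ph : List String) (k : Int) :
    ∀ (t : List String),
    (t.foldl (fun st p =>
      match st with
      | none => none
      | some prev =>
          let cur := nrow p ph prev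
          if listMin cur > k then none else some cur) (none : Option (List Int))) = none := by
  intro t
  induction t with
  | nil => rfl
  | cons p t' ih => simpa using ih

theorem bWordLoop_spec (ph : List String) (k : Int) :
    ∀ (t : List String) (prev : List Int), prev ≠ [] →
    (t.foldl (fun st p =>
      match st with
      | none => none
      | some prev =>
          let cur := nrow p ph prev
          if listMin cur > k then none else some cur) (some prev)
      = some (levFrom t ph prev))
    ∨ (t.foldl (fun st p =>
      match st with
      | none => none
      | some prev =>
          let cur := nrow p ph prev
          if listMin cur > k then none else some cur) (some prev)
      = none ∧ k < listMin (levFrom t ph prev)) := by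
  intro t
  induction t with
  | nil => intro prev _; left; rfl
  | cons p t' ih =>
      intro prev hne
      simp only [List.foldl_cons]
      by_cases hbreak : listMin (nrow p ph prev) > k
      · right
        constructor
        · rw [if_pos hbreak]
          exact foldl_step_none ph k t'
        · have h1 : listMin (nrow p ph prev) ≤ listMin (levFrom t' ph (nrow p ph prev)) :=
            levFrom_min_mono ph t' _ (nrow_ne_nil p ph prev hne)
          have h2 : levFrom (p :: t') ph prev = levFrom t' ph (nrow p ph prev) := rfl
          rw [h2]
          omega
      · rw [if_neg hbreak]
        exact ih (nrow p ph prev) (nrow_ne_nil p ph prev hne)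

-- ---------- linking levFrom with Rrow ----------

theorem foldl_getD_range {α β : Type} (d : α) (f : β → α → β) :
    ∀ (t : List α) (acc : β),
    t.foldl f acc = (List.range t.length).foldl (fun b i => f b (t.getD i d)) acc := by
  intro t
  induction t with
  | nil => intro acc; rfl
  | cons x t' ih =>
      intro acc
      have hr : List.range (x :: t').length = 0 :: (List.range t'.length).map Nat.succ := by
        simpa using List.range_succ_eq_map (n := t'.length)
      rw [hr]
      simp only [List.foldl_cons, List.foldl_map, List.getD_cons_zero, List.getD_cons_succ]
      exact ih (f acc x)

theorem Rrow_eq_foldl_range (t ph : List String) :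
    ∀ (i : Nat),
    (List.range i).foldl (fun r i0 => nrow (t.getD i0 "") ph r) (row0 ph.length)
      = Rrow t ph i := by
  intro i
  induction i with
  | zero => rfl
  | succ i ih =>
      rw [List.range_succ, List.foldl_append, ih]
      simp only [List.foldl_cons, List.foldl_nil]
      rfl

theorem levFrom_eq_Rrow (t ph : List String) :
    levFrom t ph (row0 ph.length) = Rrow t ph t.length := by
  rw [levFrom, foldl_getD_range "" (fun r p => nrow p ph r) t (row0 ph.length)]
  exact Rrow_eq_foldl_range t ph t.length

-- ---------- final assembly ----------

theorem lastVal_eq_getD (l : List Int) (L : Nat) (h : l.length = L + 1) :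
    lastVal l = l.getD L 0 := by
  rw [lastVal, PySem.List.pyGet?_neg_one]
  rw [List.getLast?_eq_getElem?, h]
  simp only [Nat.add_sub_cancel]
  rw [List.getD_eq_getElem?_getD]

theorem pyRange_eq_row0 (n : Nat) : PySem.List.pyRange 0 ((n : Int) + 1) 1 = row0 n := by
  rw [PySem.List.pyRange_one, row0]
  have hlen : (((n : Int) + 1) - 0).toNat = n + 1 := by omega
  rw [hlen]
  apply List.map_congr_left
  intro i _
  omega

theorem listMin_le_getD (l : List Int) (i : Nat) (h : i < l.length) :
    listMin l ≤ l.getD i 0 := by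
  cases l with
  | nil => simp at h
  | cons c r =>
      apply listMin_le_mem c r
      rw [List.getD_eq_getElem?_getD, List.getElem?_eq_getElem h]
      exact List.getElem_mem h

theorem row0_ne_nil (n : Nat) : row0 n ≠ [] := by
  have := row0_length n
  intro h; rw [h] at this; simp at this

theorem perword (tp : List String) (k : Int) (acc : List (String × Int)) (wp : String × List String) :
    (if |((wp.2.length : Int)) - ((tp.length : Nat) : Int)| > k then acc
     else
       let dist := phoneme_edit_distance tp wp.2
       if dist ≤ k ∧ dist > 0 then acc ++ [(PySem.Str.lower wp.1, dist)] else acc)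
    =
    (if |((wp.2.length : Int)) - ((tp.length : Nat) : Int)| > k then acc
     else
       match bWordLoop tp wp.2 k with
       | none => acc
       | some prev =>
           let d := lastVal prev
           if 0 < d ∧ d ≤ k then acc ++ [(PySem.Str.lower wp.1, d)] else acc) := by
  by_cases hf : |((wp.2.length : Int)) - ((tp.length : Nat) : Int)| > k
  · rw [if_pos hf, if_pos hf]
  · rw [if_neg hf, if_neg hf]
    have hloop : bWordLoop tp wp.2 k
        = tp.foldl (fun st p =>
            match st with
            | none => none
            | some prev =>
                let cur := nrow p wp.2 prev
                if listMin cur > k then none else some cur)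
          (some (row0 wp.2.length)) := by
      rw [bWordLoop, pyRange_eq_row0]
    have hd : phoneme_edit_distance tp wp.2 = (Rrow tp wp.2 tp.length).getD wp.2.length 0 :=
      phoneme_edit_distance_eq tp wp.2
    have hlev : levFrom tp wp.2 (row0 wp.2.length) = Rrow tp wp.2 tp.length :=
      levFrom_eq_Rrow tp wp.2
    rcases bWordLoop_spec wp.2 k tp (row0 wp.2.length) (row0_ne_nil wp.2.length) with hb | ⟨hb, hmin⟩
    · rw [hloop, hb, hlev]
      have hlast : lastVal (Rrow tp wp.2 tp.length) = (Rrow tp wp.2 tp.length).getD wp.2.length 0 :=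
        lastVal_eq_getD _ _ (Rrow_length tp wp.2 tp.length)
      simp only [hd, hlast]
      by_cases hc : 0 < (Rrow tp wp.2 tp.length).getD wp.2.length 0
          ∧ (Rrow tp wp.2 tp.length).getD wp.2.length 0 ≤ k
      · rw [if_pos (by exact ⟨hc.2, hc.1⟩), if_pos hc]
      · rw [if_neg (by intro hx; exact hc ⟨hx.2, hx.1⟩), if_neg hc]
    · rw [hloop, hb]
      rw [hlev] at hmin
      have hle : listMin (Rrow tp wp.2 tp.length) ≤ (Rrow tp wp.2 tp.length).getD wp.2.length 0 :=
        listMin_le_getD _ _ (by rw [Rrow_length]; omega)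
      rw [hd]
      rw [if_neg (by intro hx; omega)]

-- ===== VERDICT (by name: the statement is the Claim_ definition above) =====
theorem find_single_word_confusions_spec : Claim_equal_find_single_word_confusions := by
  intro target_phonemes cmudict max_distance max_results _
  unfold Spec_find_single_word_confusions
  have h := foldl_congr'
    (fun (acc : List (String × Int)) (wp : String × List String) =>
      if |((wp.2.length : Int)) - ((target_phonemes.length : Nat) : Int)| > max_distance then acc
      else
        if phoneme_edit_distance target_phonemes wp.2 ≤ max_distance
            ∧ phoneme_edit_distance target_phonemes wp.2 > 0
          then acc ++ [(PySem.Str.lower wp.1, phoneme_edit_distance target_phonemes wp.2)]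
          else acc)
    (fun (acc : List (String × Int)) (wp : String × List String) =>
      if |((wp.2.length : Int)) - ((target_phonemes.length : Nat) : Int)| > max_distance then acc
      else
        match bWordLoop target_phonemes wp.2 max_distance with
        | none => acc
        | some prev =>
            if 0 < lastVal prev ∧ lastVal prev ≤ max_distance
              then acc ++ [(PySem.Str.lower wp.1, lastVal prev)] else acc)
    (fun acc wp => perword target_phonemes max_distance acc wp)
    (PySem.Dict.ofList cmudict).items []
  simp only [find_single_word_confusions, find_single_word_confusions_alt]
  rw [h]
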